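-- pv_equiv track=rewrite | github.com/JagdtigerAusfb/EXTENCUBE-RAIDEN | Software/Cube_app/main.py | converter_movimentos
-- ===== SOURCE A (Python) =====
-- def converter_movimentos(seq):
--     tabela = {
--         "U": "A", "U'": "B", "U2": "C",
--         "R": "D", "R'": "E", "R2": "F",
--         "F": "G", "F'": "H", "F2": "I",
--         "D": "J", "D'": "K", "D2": "L",
--         "L": "M", "L'": "N", "L2": "O",
--         "B": "P", "B'": "Q", "B2": "R"
--     }
--     try:
--         return "".join(tabela[m] for m in seq.split())
--     except KeyError as e:
--         raise ValueError(f"Invalid move: {e}")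
-- ===== SOURCE B (Python) =====
-- def converter_movimentos(seq):
--     out = []
--     for m in seq.split():
--         f = "URFDLB".find(m[0]) if m else -1
--         rest = m[1:]
--         mod = 0 if rest == "" else 1 if rest == "'" else 2 if rest == "2" else -1
--         if f < 0 or mod < 0:
--             raise ValueError("Invalid move: " + repr(m))
--         out.append(chr(65 + 3 * f + mod))
--     return "".join(out)
-- ===== Notes on version B (the rewrite author's own statement) =====
-- stated objective: alternative
-- what changed: Replaces the 18-entry lookup table by an arithmetic encoding: each token is split into face and modifier, and the output letter is computed as chr(65 + 3*faceIndex + modifierIndex) from the face's position among the six face letters, so no move table exists at all.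
import Mathlib
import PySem

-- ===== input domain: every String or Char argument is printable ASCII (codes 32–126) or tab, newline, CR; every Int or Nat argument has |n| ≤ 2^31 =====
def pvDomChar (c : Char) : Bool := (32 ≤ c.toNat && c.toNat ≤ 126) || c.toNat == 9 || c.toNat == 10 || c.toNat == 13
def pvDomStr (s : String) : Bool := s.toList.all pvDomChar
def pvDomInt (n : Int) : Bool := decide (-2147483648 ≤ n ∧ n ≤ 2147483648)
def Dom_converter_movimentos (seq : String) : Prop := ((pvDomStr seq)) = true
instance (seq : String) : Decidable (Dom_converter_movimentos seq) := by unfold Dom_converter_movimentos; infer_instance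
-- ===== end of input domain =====

-- B replaces A's 18-entry lookup table by an arithmetic encoding chr(65 + 3*faceIndex + modifierIndex); alternative decomposition, same cost.

-- ===== PORT A =====
def tabelaA : PySem.Dict String String := PySem.Dict.ofList
  [("U", "A"), ("U'", "B"), ("U2", "C"),
   ("R", "D"), ("R'", "E"), ("R2", "F"),
   ("F", "G"), ("F'", "H"), ("F2", "I"),
   ("D", "J"), ("D'", "K"), ("D2", "L"),
   ("L", "M"), ("L'", "N"), ("L2", "O"),
   ("B", "P"), ("B'", "Q"), ("B2", "R")]

-- A raises ValueError when some token is not a key of the table; those inputs are outside Pre_ and the port returns "" there.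
def converter_movimentos (seq : String) : String :=
  let toks := PySem.Str.split₀ seq
  if toks.all (fun m => (tabelaA.get? m).isSome)
  then PySem.Str.join "" (toks.map (fun m => (tabelaA.get? m).getD ""))
  else ""

-- ===== PORT B =====
-- "URFDLB".find(m[0]) (−1 if m is empty or the face is unknown)
def pvFaceIdx (m : List Char) : Int :=
  match m with
  | 'U' :: _ => 0
  | 'R' :: _ => 1
  | 'F' :: _ => 2
  | 'D' :: _ => 3
  | 'L' :: _ => 4
  | 'B' :: _ => 5
  | _ => -1

-- modifier index of m[1:]
def pvModIdx (m : List Char) : Int :=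
  match m.drop 1 with
  | [] => 0
  | ['\''] => 1
  | ['2'] => 2
  | _ => -1

-- one loop iteration of Source B: encode the token or fail (ValueError)
def pvEncode (m : String) : Option Char :=
  let f := pvFaceIdx m.toList
  let mod := pvModIdx m.toList
  if f < 0 || mod < 0 then none else some (Char.ofNat (65 + 3 * f + mod).toNat)

def converter_movimentos_alt (seq : String) : String :=
  let step := fun (acc : Option (List Char)) (m : String) =>
    match acc with
    | none => none
    | some cs =>
      match pvEncode m with
      | none => none
      | some c => some (cs ++ [c])
  match (PySem.Str.split₀ seq).foldl step (some []) with
  | some cs => String.ofList cs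
  | none => ""   -- ValueError raised; outside Pre_

-- ===== PRECONDITION & SPEC =====
def pvValidMoves : List String :=
  ["U", "U'", "U2", "R", "R'", "R2", "F", "F'", "F2",
   "D", "D'", "D2", "L", "L'", "L2", "B", "B'", "B2"]

-- Pre_ excludes exactly the inputs on which A raises ValueError (a token outside the move table); A returns on all admitted inputs.
def Pre_converter_movimentos (seq : String) : Prop :=
  ∀ m ∈ PySem.Str.split₀ seq, m ∈ pvValidMoves

instance (seq : String) : Decidable (Pre_converter_movimentos seq) := by
  unfold Pre_converter_movimentos; infer_instance

def pvWitness_converter_movimentos : String := "R U R' U'"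

def Spec_converter_movimentos (seq : String) (out : String) : Prop := out = converter_movimentos_alt seq
instance (seq : String) (out : String) : Decidable (Spec_converter_movimentos seq out) := by unfold Spec_converter_movimentos; infer_instance

-- ===== CLAIM (what is proved, stated in full; the proofs are below) =====
def Claim_equal_converter_movimentos : Prop := ∀ (seq : String), Dom_converter_movimentos seq → Pre_converter_movimentos seq → Spec_converter_movimentos seq (converter_movimentos seq)

-- ===== LEMMAS AND PROOFS =====

-- pointwise agreement on the 18 valid tokens
theorem pv_pointwise : ∀ m ∈ pvValidMoves,
    (tabelaA.get? m).isSome = true ∧ (pvEncode m).isSome = true ∧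
    ((tabelaA.get? m).getD "").toList = [(pvEncode m).getD 'A'] := by
  decide

theorem pv_foldB (toks : List String) (h : ∀ m ∈ toks, m ∈ pvValidMoves) (cs : List Char) :
    toks.foldl
      (fun (acc : Option (List Char)) (m : String) =>
        match acc with
        | none => none
        | some cs =>
          match pvEncode m with
          | none => none
          | some c => some (cs ++ [c])) (some cs)
      = some (cs ++ toks.map (fun m => (pvEncode m).getD 'A')) := by
  induction toks generalizing cs with
  | nil => simp
  | cons t rest ih =>
    have ht := pv_pointwise t (h t (by simp))
    obtain ⟨c, hc⟩ := Option.isSome_iff_exists.mp ht.2.1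
    simp only [List.foldl_cons, hc]
    rw [ih (fun m hm => h m (by simp [hm]))]
    simp [hc]

theorem converter_movimentos_spec : Claim_equal_converter_movimentos := by
  intro seq _ hpre
  unfold Spec_converter_movimentos converter_movimentos converter_movimentos_alt
  simp only
  set toks := PySem.Str.split₀ seq with htoks
  have hall : toks.all (fun m => (tabelaA.get? m).isSome) = true := by
    rw [List.all_eq_true]; intro m hm; exact (pv_pointwise m (hpre m hm)).1
  rw [hall, if_pos rfl, pv_foldB toks hpre []]
  simp only [List.nil_append]
  apply String.toList_injective
  rw [PySem.Str.toList_join]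
  have hmap : (toks.map (fun m => (tabelaA.get? m).getD "")).map String.toList
      = (toks.map (fun m => (pvEncode m).getD 'A')).map (fun c => [c]) := by
    simp only [List.map_map]
    exact List.map_congr_left (fun m hm => (pv_pointwise m (hpre m hm)).2.2)
  rw [hmap, show ("" : String).toList = [] from rfl, PySem.Chars.join_nil_singletons]
  simp
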